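-- pv_equiv track=rewrite | github.com/l-i-a-n-a/ColingPython-p1 | HW1/G/G.py | solution
-- ===== SOURCE A (Python) =====
-- def solution(a, b):
--     c = []
--     for k in b:
--         if k not in a:
--             c.append(k)
--     c = a + c
--     c.sort()
--     return c
-- ===== SOURCE B (Python) =====
-- import bisect
--
-- def solution(a, b):
--     result = sorted(a)
--     for k in b:
--         if k not in a:
--             bisect.insort(result, k)
--     return result
-- ===== Notes on version B (the rewrite author's own statement) =====
-- stated objective: alternative
-- what changed: Instead of collecting missing b-elements, concatenating and batch-sorting, B starts from sorted(a) and maintains the sorted invariant incrementally with bisect.insort for each b-element absent from a; unlike A it never mutates a conceptual copy via list.sort (A builds and sorts a fresh list too, so no observable mutation either way).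
import Mathlib
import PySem

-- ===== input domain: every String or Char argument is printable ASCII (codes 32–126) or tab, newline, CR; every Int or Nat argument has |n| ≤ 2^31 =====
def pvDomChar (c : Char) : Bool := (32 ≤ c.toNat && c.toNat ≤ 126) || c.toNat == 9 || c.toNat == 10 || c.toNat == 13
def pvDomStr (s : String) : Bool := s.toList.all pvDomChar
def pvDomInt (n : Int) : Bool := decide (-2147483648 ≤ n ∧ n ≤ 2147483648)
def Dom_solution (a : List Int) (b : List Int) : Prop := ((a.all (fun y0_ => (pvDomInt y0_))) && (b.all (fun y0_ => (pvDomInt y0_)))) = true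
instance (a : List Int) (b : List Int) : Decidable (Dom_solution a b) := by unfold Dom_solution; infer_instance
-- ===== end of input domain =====

-- B maintains the sorted result incrementally (sorted(a) + bisect.insort of each missing b-element) instead of A's collect-concatenate-batch-sort; an alternative of similar cost.

-- ===== PORT A =====
def solution (a : List Int) (b : List Int) : List Int :=
  let c := b.foldl (fun c k => if a.contains k then c else c ++ [k]) []
  PySem.List.sorted (a ++ c) (fun x => x) false

-- ===== PORT B =====
-- bisect.insort into a sorted list: insert after all elements ≤ k (insort_right)
def pvInsort (l : List Int) (k : Int) : List Int :=
  match l with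
  | [] => [k]
  | x :: xs => if k < x then k :: x :: xs else x :: pvInsort xs k

def solution_alt (a : List Int) (b : List Int) : List Int :=
  b.foldl (fun r k => if a.contains k then r else pvInsort r k)
    (PySem.List.sorted a (fun x => x) false)

-- ===== PRECONDITION & SPEC =====
def Spec_solution (a : List Int) (b : List Int) (out : List Int) : Prop := out = solution_alt a b
instance (a : List Int) (b : List Int) (out : List Int) : Decidable (Spec_solution a b out) := by unfold Spec_solution; infer_instance

-- ===== CLAIM (what is proved, stated in full; the proofs are below) =====
def Claim_equal_solution : Prop := ∀ (a : List Int) (b : List Int), Dom_solution a b → Spec_solution a b (solution a b)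

-- ===== LEMMAS AND PROOFS =====

theorem pvInsort_perm (l : List Int) (k : Int) : (pvInsort l k).Perm (k :: l) := by
  induction l with
  | nil => simp [pvInsort]
  | cons x xs ih =>
    simp only [pvInsort]
    split
    · exact List.Perm.refl _
    · exact (List.Perm.cons x ih).trans (List.Perm.swap k x xs)

theorem pvInsort_mem {l : List Int} {k y : Int} (h : y ∈ pvInsort l k) : y = k ∨ y ∈ l := by
  have := (pvInsort_perm l k).mem_iff.mp h
  simpa using this

theorem pvInsort_pairwise {l : List Int} (k : Int) (h : l.Pairwise (· ≤ ·)) :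
    (pvInsort l k).Pairwise (· ≤ ·) := by
  induction l with
  | nil => simp [pvInsort]
  | cons x xs ih =>
    rcases List.pairwise_cons.mp h with ⟨hx, hxs⟩
    simp only [pvInsort]
    split
    · rename_i hk
      refine List.pairwise_cons.mpr ⟨?_, h⟩
      intro y hy
      rcases List.mem_cons.mp hy with rfl | hy
      · exact le_of_lt hk
      · exact le_of_lt (lt_of_lt_of_le hk (hx y hy))
    · rename_i hk
      refine List.pairwise_cons.mpr ⟨?_, ih hxs⟩
      intro y hy
      rcases pvInsort_mem hy with rfl | hy
      · exact le_of_not_gt hk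
      · exact hx y hy

-- A's loop collects exactly the b-elements missing from a
theorem loopA_eq_filter (a : List Int) (b : List Int) (c : List Int) :
    b.foldl (fun c k => if a.contains k then c else c ++ [k]) c
      = c ++ b.filter (fun k => !a.contains k) := by
  induction b generalizing c with
  | nil => simp
  | cons x xs ih =>
    rw [List.foldl_cons, List.filter_cons, ih]
    by_cases hx : x ∈ a
    · simp [hx]
    · simp [hx]

-- B's loop: permutation + sortedness invariant
theorem loopB_invariant (a : List Int) (b : List Int) (r : List Int)
    (hs : r.Pairwise (· ≤ ·)) :
    (b.foldl (fun r k => if a.contains k then r else pvInsort r k) r).Perm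
        (r ++ b.filter (fun k => !a.contains k)) ∧
    (b.foldl (fun r k => if a.contains k then r else pvInsort r k) r).Pairwise (· ≤ ·) := by
  induction b generalizing r with
  | nil =>
    refine ⟨?_, hs⟩
    simp
  | cons x xs ih =>
    rw [List.foldl_cons, List.filter_cons]
    by_cases hx : x ∈ a
    · rw [if_pos (by simpa using hx), if_neg (by simpa using hx)]
      exact ih r hs
    · rw [if_neg (by simpa using hx), if_pos (by simpa using hx)]
      rcases ih (pvInsort r x) (pvInsort_pairwise x hs) with ⟨hp, hsort⟩
      refine ⟨hp.trans ?_, hsort⟩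
      exact (List.Perm.append_right _ (pvInsort_perm r x)).trans List.perm_middle.symm

theorem solution_eq (a : List Int) (b : List Int) : solution a b = solution_alt a b := by
  unfold solution solution_alt
  have hA := loopA_eq_filter a b []
  simp only [List.nil_append] at hA
  rw [hA]
  have hsa : (PySem.List.sorted a (fun x => x) false).Pairwise (· ≤ ·) :=
    PySem.List.sorted_pairwise a (fun x => x)
  rcases loopB_invariant a b (PySem.List.sorted a (fun x => x) false) hsa with ⟨hp, hsort⟩
  refine PySem.List.sorted_id_eq_of_perm_of_pairwise _ _ ?_ hsort
  exact hp.trans (List.Perm.append_right _ (PySem.List.sorted_perm a (fun x => x) false))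

-- ===== VERDICT (by name: the statement is the Claim_ definition above) =====
theorem solution_spec : Claim_equal_solution := by
  intro a b _
  unfold Spec_solution
  exact solution_eq a b
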